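-- pv_equiv track=rewrite | github.com/blbailey/market_course_exercise | code_shapely.py | select_ones
-- ===== SOURCE A (Python) =====
-- def select_ones(eles, ones, idx):
--     ele_with=[] # {S}
--     ele_wo=[] # {S\j}
--     for ele in eles:
--         ele_list = list(ele)
--         one_count=ele_list.count('1')
--         if one_count==ones:
--             ele_list_copy=ele_list.copy()
--             ele_list_copy.insert(idx, '1')
--             ele_with.append("".join(ele_list_copy))
--             ele_list_copy=ele_list.copy()
--             ele_list_copy.insert(idx, '0')
--             ele_wo.append("".join(ele_list_copy))
--     return ele_with, ele_wo
-- ===== SOURCE B (Python) =====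
-- def select_ones(eles, ones, idx):
--     buckets = {}
--     for ele in eles:
--         cnt = ele.count('1')
--         buckets.setdefault(cnt, []).append(ele)
--     matching = buckets.get(ones, [])
--     return ([e[:idx] + '1' + e[idx:] for e in matching],
--             [e[:idx] + '0' + e[idx:] for e in matching])
-- ===== Notes on version B (the rewrite author's own statement) =====
-- stated objective: alternative
-- what changed: Groups the elements into a dict bucketed by their '1'-count and looks up the 'ones' bucket once, then builds each variant by string slicing (e[:idx]+c+e[idx:]) instead of list-conversion plus list.insert plus join.
import Mathlib
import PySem

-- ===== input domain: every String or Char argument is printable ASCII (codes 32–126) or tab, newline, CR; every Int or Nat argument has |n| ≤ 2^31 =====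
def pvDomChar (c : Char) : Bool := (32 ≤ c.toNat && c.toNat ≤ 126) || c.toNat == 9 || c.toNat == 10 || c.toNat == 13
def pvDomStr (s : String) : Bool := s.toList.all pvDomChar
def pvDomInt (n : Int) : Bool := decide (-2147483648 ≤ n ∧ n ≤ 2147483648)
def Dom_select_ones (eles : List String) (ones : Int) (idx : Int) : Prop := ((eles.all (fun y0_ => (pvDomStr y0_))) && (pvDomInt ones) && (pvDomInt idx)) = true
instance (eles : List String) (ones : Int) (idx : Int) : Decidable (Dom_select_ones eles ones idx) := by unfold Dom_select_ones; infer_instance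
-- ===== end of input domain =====

-- B buckets the elements in a dict keyed by '1'-count and reads the 'ones' bucket once,
-- building each variant by string slicing instead of list.insert (objective: alternative); same return value.

-- ===== PORT A =====
-- literal transliteration of A's single loop with its two accumulator lists and list.insert
def select_ones (eles : List String) (ones : Int) (idx : Int) : List String × List String :=
  eles.foldl (fun acc ele =>
    let ele_list := ele.toList
    let one_count := PySem.List.count ele_list '1'
    if (one_count : Int) = ones then
      (acc.1 ++ [String.ofList (PySem.List.insert ele_list idx '1')],
       acc.2 ++ [String.ofList (PySem.List.insert ele_list idx '0')])
    else acc) ([], [])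

-- ===== PORT B =====
-- e[:idx] + c + e[idx:]
def selOnesSplice (idx : Int) (c : Char) (e : String) : String :=
  String.ofList (PySem.List.slice e.toList none (some idx) ++ c :: PySem.List.slice e.toList (some idx) none)

-- the grouping loop: buckets.setdefault(cnt, []).append(ele), i.e. d[cnt] = d.get(cnt, []) + [ele]
def selOnesBuckets (eles : List String) : PySem.Dict Int (List String) :=
  eles.foldl (fun d ele =>
    d.modify (PySem.List.count ele.toList '1' : Int) [] (· ++ [ele])) PySem.Dict.empty

def select_ones_alt (eles : List String) (ones : Int) (idx : Int) : List String × List String :=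
  let matching := (selOnesBuckets eles).getD ones []
  (matching.map (selOnesSplice idx '1'), matching.map (selOnesSplice idx '0'))

-- ===== PRECONDITION & SPEC =====
def Spec_select_ones (eles : List String) (ones : Int) (idx : Int) (out : List String × List String) : Prop := out = select_ones_alt eles ones idx
instance (eles : List String) (ones : Int) (idx : Int) (out : List String × List String) : Decidable (Spec_select_ones eles ones idx out) := by unfold Spec_select_ones; infer_instance

-- ===== CLAIM (what is proved, stated in full; the proofs are below) =====
def Claim_equal_select_ones : Prop := ∀ (eles : List String) (ones : Int) (idx : Int), Dom_select_ones eles ones idx → Spec_select_ones eles ones idx (select_ones eles ones idx)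

-- ===== LEMMAS AND PROOFS =====
-- Python identity: l.insert(idx, v) produces l[:idx] + [v] + l[idx:] for every int idx
lemma insert_eq_slices {α : Type} (xs : List α) (i : Int) (v : α) :
    PySem.List.insert xs i v = PySem.List.slice xs none (some i) ++ v :: PySem.List.slice xs (some i) none := by
  have h1 : PySem.List.slice xs none (some i) = xs.take (PySem.List.clampIdx xs.length i) := by
    simp [PySem.List.slice]
  have h2 : PySem.List.slice xs (some i) none = xs.drop (PySem.List.clampIdx xs.length i) := by
    simp [PySem.List.slice, PySem.List.clampIdx]
  rw [h1, h2]
  simp only [PySem.List.insert, PySem.List.sliceIndices]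
  have hk : ((if i < 0 then max (i + (xs.length:Int)) 0 else min i (xs.length:Int)) : Int).toNat
      = PySem.List.clampIdx xs.length i := by
    simp only [PySem.List.clampIdx]; split_ifs <;> omega
  simp only [if_neg (by norm_num : ¬ ((1:Int) < 0))] at *
  rw [hk]

-- A's fused loop produces the filtered list mapped through the two splices
lemma select_ones_foldl_inv (ones idx : Int) :
    ∀ (eles : List String) (acc : List String × List String),
      eles.foldl (fun acc ele =>
        let ele_list := ele.toList
        let one_count := PySem.List.count ele_list '1'
        if (one_count : Int) = ones then
          (acc.1 ++ [String.ofList (PySem.List.insert ele_list idx '1')],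
           acc.2 ++ [String.ofList (PySem.List.insert ele_list idx '0')])
        else acc) acc
      = (acc.1 ++ (eles.filter (fun ele => (PySem.List.count ele.toList '1' : Int) == ones)).map (selOnesSplice idx '1'),
         acc.2 ++ (eles.filter (fun ele => (PySem.List.count ele.toList '1' : Int) == ones)).map (selOnesSplice idx '0')) := by
  intro eles
  induction eles with
  | nil => intro acc; simp
  | cons e es ih =>
      intro acc
      simp only [PySem.List.count_eq] at ih
      simp only [List.foldl_cons, PySem.List.count_eq]
      by_cases h : ((e.toList.count '1' : Int) = ones)
      · rw [if_pos h, ih]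
        simp [selOnesSplice, insert_eq_slices, h]
      · rw [if_neg h, ih]
        simp [h]

-- B's grouping dict read at key 'ones' is exactly the filtered list
lemma select_ones_bucket (eles : List String) (ones : Int) :
    (selOnesBuckets eles).getD ones []
      = eles.filter (fun ele => (PySem.List.count ele.toList '1' : Int) == ones) := by
  have hmap : selOnesBuckets eles
      = ((eles.map (fun ele => ((PySem.List.count ele.toList '1' : Int), ele))).foldl
          (fun d p => d.modify p.1 [] (· ++ [p.2])) PySem.Dict.empty) := by
    unfold selOnesBuckets; rw [List.foldl_map]
  rw [hmap, PySem.Dict.getD_foldl_modify_append, PySem.Dict.getD_empty]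
  simp [List.filter_map, Function.comp_def]

-- ===== VERDICT (by name: the statement is the Claim_ definition above) =====
theorem select_ones_spec : Claim_equal_select_ones := by
  intro eles ones idx _
  unfold Spec_select_ones select_ones
  rw [select_ones_foldl_inv ones idx eles ([], [])]
  simp only [select_ones_alt, select_ones_bucket]
  simp
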